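-- pv_equiv track=rewrite | github.com/park-sy/1day_1git | Programmers/레벨3-1.py | solution
-- ===== SOURCE A (Python) =====
-- def solution(A, B):
--     n = len(A)
--     answer = 0
--     A.sort()
--     B.sort()
--     id = 0
--     for i in range(n):
--         for j in range(id,n):
--             if B[j] > A[i]:
--                 answer += 1
--                 id = j + 1
--                 break
--
--
--
--     return answer
-- ===== SOURCE B (Python) =====
-- def solution(A, B):
--     # Two-pointer pass: A's loops are both bounded by len(A), so only the first
--     # len(A) elements of sorted B are ever examined; on the problem's domain
--     # (equal lengths) the slice is a no-op.
--     A.sort()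
--     B.sort()
--     i = 0
--     for b in B[:len(A)]:
--         if i < len(A) and b > A[i]:
--             i += 1
--     return i
-- ===== Notes on version B (the rewrite author's own statement) =====
-- stated objective: faster
-- what changed: Replaces the nested loop (for each sorted A[i], a restartable index scan of B from id) with a single two-pointer pass over sorted(B)[:len(A)] (the exact range A's loops examine) advancing one pointer into sorted A, removing the repeated failing rescans.
import Mathlib
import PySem

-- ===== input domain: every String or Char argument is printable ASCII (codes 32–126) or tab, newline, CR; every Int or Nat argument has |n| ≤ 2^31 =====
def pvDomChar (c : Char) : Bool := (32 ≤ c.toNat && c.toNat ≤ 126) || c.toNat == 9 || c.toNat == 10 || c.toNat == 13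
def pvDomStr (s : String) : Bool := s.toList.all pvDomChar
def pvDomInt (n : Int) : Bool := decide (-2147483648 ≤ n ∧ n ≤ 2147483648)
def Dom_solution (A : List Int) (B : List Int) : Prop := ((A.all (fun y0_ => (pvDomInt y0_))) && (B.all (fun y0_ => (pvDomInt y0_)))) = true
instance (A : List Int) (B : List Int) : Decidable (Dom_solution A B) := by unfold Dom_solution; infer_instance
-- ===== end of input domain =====

-- B replaces A's nested loops with a single two-pointer pass over sorted(B)[:len(A)] (the exact
-- range A's loops examine; a no-op slice on the problem's equal-length domain); both A and B sort
-- their arguments IN PLACE — the equivalence proved here is about the return value only (the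
-- mutation is identical).

-- ===== PORT A =====
-- inner loop 'for j in range(id, n): if B[j] > A[i]: answer += 1; id = j + 1; break':
-- returns some (j+1) on the break, none when the loop completes without a break.
-- B[j] is ported as pyGetD Bs j 0: exact whenever the index is in range, which Pre_ guarantees.
def solutionScan (Bs : List Int) (a : Int) : List Int → Option Int
  | [] => none
  | j :: js => if PySem.List.pyGetD Bs j 0 > a then some (j + 1) else solutionScan Bs a js

-- one iteration of the outer 'for i in range(n)' loop; state = (answer, id)
def solutionStep (As Bs : List Int) (n : Int) (st : Int × Int) (i : Int) : Int × Int :=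
  match solutionScan Bs (PySem.List.pyGetD As i 0) (PySem.List.pyRange st.2 n 1) with
  | some newId => (st.1 + 1, newId)
  | none => st

def solution (A : List Int) (B : List Int) : Int :=
  let n : Int := A.length
  let As := PySem.List.sorted A (fun x => x) false
  let Bs := PySem.List.sorted B (fun x => x) false
  ((PySem.List.pyRange 0 n 1).foldl (solutionStep As Bs n) (0, 0)).1

-- ===== PORT B =====
-- two-pointer pass: i counts matched elements of sorted A; 'i < len(A) and b > A[i]' is ported
-- with a Nat counter (i starts at 0 and only grows, so Python's i is this Nat), A[i] as getD;
-- the slice B[:len(A)] (nonnegative bound) is List.take, exact.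
def solution_alt (A : List Int) (B : List Int) : Int :=
  let As := PySem.List.sorted A (fun x => x) false
  let Bs := (PySem.List.sorted B (fun x => x) false).take A.length
  ((Bs.foldl (fun (i : Nat) b => if i < As.length ∧ As.getD i 0 < b then i + 1 else i) 0 : Nat) : Int)

-- ===== PRECONDITION & SPEC =====
-- Exactly the inputs on which A returns: when len(B) < len(A), A's inner loop indexes B up to
-- len(A)-1 and raises IndexError (the intended problem guarantees equal lengths).
def Pre_solution (A : List Int) (B : List Int) : Prop := A.length ≤ B.length
instance (A : List Int) (B : List Int) : Decidable (Pre_solution A B) := by unfold Pre_solution; infer_instance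
def pvWitness_solution : List Int × List Int := ([1, 2], [2, 3])

def Spec_solution (A : List Int) (B : List Int) (out : Int) : Prop := out = solution_alt A B
instance (A : List Int) (B : List Int) (out : Int) : Decidable (Spec_solution A B out) := by unfold Spec_solution; infer_instance

-- ===== CLAIM (what is proved, stated in full; the proofs are below) =====
def Claim_equal_solution : Prop := ∀ (A : List Int) (B : List Int), Dom_solution A B → Pre_solution A B → Spec_solution A B (solution A B)

-- ===== LEMMAS AND PROOFS =====

-- the common greedy-matching count on two (sorted) lists; both ports reduce to it
def pvG : List Int → List Int → Nat
  | _, [] => 0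
  | [], _ :: _ => 0
  | a :: as, b :: bs => if a < b then 1 + pvG as bs else pvG (a :: as) bs
termination_by _ bs => bs.length

-- index (in bs) of the first element strictly greater than a
def pvFind (a : Int) : List Int → Option Nat
  | [] => none
  | b :: bs => if a < b then some 0 else (pvFind a bs).map (· + 1)

theorem pvG_nil_left (bs : List Int) : pvG [] bs = 0 := by
  cases bs <;> simp [pvG]

theorem pvG_zero (as bs : List Int) (h : ∀ a ∈ as, ∀ b ∈ bs, b ≤ a) : pvG as bs = 0 := by
  induction bs generalizing as with
  | nil => cases as <;> simp [pvG]
  | cons b bs ih =>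
    cases as with
    | nil => simp [pvG]
    | cons a as =>
      have hba : b ≤ a := h a (by simp) b (by simp)
      simp only [pvG, if_neg (not_lt.mpr hba)]
      exact ih (a :: as) (fun a' ha' b' hb' => h a' ha' b' (by simp [hb']))

theorem pvFind_none (a : Int) (bs : List Int) (h : pvFind a bs = none) : ∀ b ∈ bs, b ≤ a := by
  induction bs with
  | nil => simp
  | cons b bs ih =>
    by_cases hab : a < b
    · simp [pvFind, hab] at h
    · simp only [pvFind, if_neg hab, Option.map_eq_none_iff] at h
      intro b' hb'
      rcases List.mem_cons.1 hb' with rfl | hb'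
      · omega
      · exact ih h b' hb'

theorem pvFind_some_lt (a : Int) (bs : List Int) (t : Nat) (h : pvFind a bs = some t) :
    t < bs.length := by
  induction bs generalizing t with
  | nil => simp [pvFind] at h
  | cons b bs ih =>
    by_cases hab : a < b
    · simp [pvFind, hab] at h
      simp; omega
    · simp only [pvFind, if_neg hab] at h
      cases hf : pvFind a bs with
      | none => simp [hf] at h
      | some t' =>
        simp [hf] at h
        have := ih t' hf
        simp; omega

theorem pvFind_pvG (a : Int) (bs as : List Int) (t : Nat) (h : pvFind a bs = some t) :
    pvG (a :: as) bs = 1 + pvG as (bs.drop (t + 1)) := by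
  induction bs generalizing t with
  | nil => simp [pvFind] at h
  | cons b bs ih =>
    by_cases hab : a < b
    · simp [pvFind, hab] at h
      subst h
      simp [pvG, if_pos hab]
    · simp only [pvFind, if_neg hab] at h
      cases hf : pvFind a bs with
      | none => simp [hf] at h
      | some t' =>
        simp [hf] at h
        subst h
        simp only [pvG, if_neg hab]
        simpa using ih t' hf

-- the two-pointer fold of port B, characterised by pvG
theorem altFold (as : List Int) :
    ∀ (bs : List Int) (i : Nat),
      bs.foldl (fun (i : Nat) b => if i < as.length ∧ as.getD i 0 < b then i + 1 else i) i
        = i + pvG (as.drop i) bs := by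
  intro bs
  induction bs with
  | nil => intro i; simp [pvG]
  | cons b bs ih =>
    intro i
    simp only [List.foldl_cons]
    by_cases hi : i < as.length
    · have hdrop : as.drop i = as[i] :: as.drop (i + 1) := List.drop_eq_getElem_cons hi
      have hgd : as.getD i 0 = as[i] := List.getD_eq_getElem _ _ hi
      by_cases hb : as[i] < b
      · rw [if_pos (⟨hi, by rw [hgd]; exact hb⟩ : i < as.length ∧ as.getD i 0 < b), ih, hdrop]
        simp only [pvG, if_pos hb]
        omega
      · rw [if_neg (by rw [hgd]; tauto : ¬ (i < as.length ∧ as.getD i 0 < b)), ih, hdrop]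
        simp only [pvG, if_neg hb]
    · have hdrop : as.drop i = [] := List.drop_eq_nil_of_le (by omega)
      rw [if_neg (by tauto : ¬ (i < as.length ∧ as.getD i 0 < b)), ih, hdrop]
      simp [pvG_nil_left]

-- the index scan of port A, characterised by pvFind on the dropped suffix
theorem scanEq (Bs : List Int) (a : Int) :
    ∀ (k : Nat) (id : Int), 0 ≤ id → id + k = Bs.length →
      solutionScan Bs a (PySem.List.pyRange id (Bs.length) 1)
        = (pvFind a (Bs.drop id.toNat)).map (fun t : Nat => id + (t : Int) + 1) := by
  intro k
  induction k with
  | zero =>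
    intro id h0 hk
    have hid : id = (Bs.length : Int) := by omega
    rw [PySem.List.pyRange_one_eq_nil (by omega)]
    have : Bs.drop id.toNat = [] := List.drop_eq_nil_of_le (by omega)
    simp [solutionScan, this, pvFind]
  | succ k ih =>
    intro id h0 hk
    have hlt : id < (Bs.length : Int) := by omega
    have hltn : id.toNat < Bs.length := by omega
    rw [PySem.List.pyRange_one_cons hlt]
    have hget : PySem.List.pyGetD Bs id 0 = Bs[id.toNat] :=
      PySem.List.pyGetD_eq_getElem Bs 0 h0 (by omega)
    have hdrop : Bs.drop id.toNat = Bs[id.toNat] :: Bs.drop (id.toNat + 1) :=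
      List.drop_eq_getElem_cons hltn
    simp only [solutionScan, hget, hdrop, pvFind]
    by_cases hab : a < Bs[id.toNat]
    · simp [hab]
    · have h1 : (id + 1).toNat = id.toNat + 1 := by omega
      simp only [if_neg (by omega : ¬ Bs[id.toNat] > a),
        ih (id + 1) (by omega) (by omega), h1]
      cases hf : pvFind a (Bs.drop (id.toNat + 1)) with
      | none => simp
      | some t => simp; omega

-- the scan of port A only reads B-indices below n: B may be replaced by its n-prefix
theorem scanCongr (Bfull : List Int) (n : Nat) (hn : n ≤ Bfull.length) (a : Int) :
    ∀ (k : Nat) (id : Int), 0 ≤ id → id + k = n →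
      solutionScan Bfull a (PySem.List.pyRange id (n : Nat) 1)
        = solutionScan (Bfull.take n) a (PySem.List.pyRange id (n : Nat) 1) := by
  intro k
  induction k with
  | zero =>
    intro id h0 hk
    rw [PySem.List.pyRange_one_eq_nil (by omega)]
    simp [solutionScan]
  | succ k ih =>
    intro id h0 hk
    have hlt : id < (n : Int) := by omega
    have hltn : id.toNat < n := by omega
    rw [PySem.List.pyRange_one_cons hlt]
    have e1 : PySem.List.pyGetD Bfull id 0 = Bfull[id.toNat]'(by omega) :=
      PySem.List.pyGetD_eq_getElem Bfull 0 h0 (by omega)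
    have e2 : PySem.List.pyGetD (Bfull.take n) id 0 = (Bfull.take n)[id.toNat]'(by simp; omega) :=
      PySem.List.pyGetD_eq_getElem (Bfull.take n) 0 h0 (by simp; omega)
    have e3 : (Bfull.take n)[id.toNat]'(by simp; omega) = Bfull[id.toNat]'(by omega) :=
      List.getElem_take
    simp only [solutionScan, e1, e2, e3]
    split
    · rfl
    · exact ih (id + 1) (by omega) (by omega)

-- the outer fold of port A, characterised by pvG on sorted A and the n-prefix of sorted B
theorem foldLemma (As Bfull : List Int) (hA : As.Pairwise (· ≤ ·)) (hnb : As.length ≤ Bfull.length) :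
    ∀ (k : Nat) (i id ans : Int), 0 ≤ i → i + k = As.length → 0 ≤ id → id ≤ (As.length : Int) →
      ((PySem.List.pyRange i (As.length) 1).foldl (solutionStep As Bfull (As.length)) (ans, id)).1
        = ans + (pvG (As.drop i.toNat) ((Bfull.take As.length).drop id.toNat) : Int) := by
  have hBtlen : ((Bfull.take As.length).length : Int) = (As.length : Int) := by simp; omega
  intro k
  induction k with
  | zero =>
    intro i id ans hi0 hik hid0 hidn
    rw [PySem.List.pyRange_one_eq_nil (by omega)]
    have : As.drop i.toNat = [] := List.drop_eq_nil_of_le (by omega)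
    simp [this, pvG_nil_left]
  | succ k ih =>
    intro i id ans hi0 hik hid0 hidn
    have hlt : i < (As.length : Int) := by omega
    have hltn : i.toNat < As.length := by omega
    rw [PySem.List.pyRange_one_cons hlt]
    simp only [List.foldl_cons]
    have hgetA : PySem.List.pyGetD As i 0 = As[i.toNat] :=
      PySem.List.pyGetD_eq_getElem As 0 hi0 (by omega)
    have hdropA : As.drop i.toNat = As[i.toNat] :: As.drop (i.toNat + 1) :=
      List.drop_eq_getElem_cons hltn
    have hpw : (As.drop i.toNat).Pairwise (· ≤ ·) := hA.sublist (List.drop_sublist _ _)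
    have hhead : ∀ a' ∈ As.drop (i.toNat + 1), As[i.toNat] ≤ a' := by
      rw [hdropA] at hpw
      exact (List.pairwise_cons.1 hpw).1
    have hstep : solutionStep As Bfull (As.length) (ans, id) i
        = match (pvFind As[i.toNat] ((Bfull.take As.length).drop id.toNat)).map
              (fun t : Nat => id + (t : Int) + 1) with
          | some newId => (ans + 1, newId)
          | none => (ans, id) := by
      unfold solutionStep
      rw [hgetA,
        scanCongr Bfull As.length hnb As[i.toNat] ((As.length : Int) - id).toNat id hid0 (by omega),
        ← hBtlen,
        scanEq (Bfull.take As.length) As[i.toNat]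
          (((Bfull.take As.length).length : Int) - id).toNat id hid0 (by omega)]
    cases hf : pvFind As[i.toNat] ((Bfull.take As.length).drop id.toNat) with
    | none =>
      rw [hstep]
      simp only [hf, Option.map_none]
      rw [ih (i + 1) id ans (by omega) (by omega) hid0 hidn]
      have hle : ∀ b ∈ (Bfull.take As.length).drop id.toNat, b ≤ As[i.toNat] :=
        pvFind_none _ _ hf
      have h1 : (i + 1).toNat = i.toNat + 1 := by omega
      rw [h1]
      rw [pvG_zero (As.drop (i.toNat + 1)) ((Bfull.take As.length).drop id.toNat)
        (fun a' ha' b hb => le_trans (hle b hb) (hhead a' ha'))]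
      rw [pvG_zero (As.drop i.toNat) ((Bfull.take As.length).drop id.toNat) ?_]
      intro a' ha' b hb
      rw [hdropA] at ha'
      rcases List.mem_cons.1 ha' with rfl | ha'
      · exact hle b hb
      · exact le_trans (hle b hb) (hhead a' ha')
    | some t =>
      rw [hstep]
      simp only [hf, Option.map_some]
      have ht : t < ((Bfull.take As.length).drop id.toNat).length := pvFind_some_lt _ _ _ hf
      have ht' : t < (Bfull.take As.length).length - id.toNat := by simpa using ht
      rw [ih (i + 1) (id + t + 1) (ans + 1) (by omega) (by omega) (by omega) (by omega)]
      have h1 : (i + 1).toNat = i.toNat + 1 := by omega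
      have h2 : (id + t + 1).toNat = id.toNat + (t + 1) := by omega
      have h3 : (Bfull.take As.length).drop (id.toNat + (t + 1))
          = ((Bfull.take As.length).drop id.toNat).drop (t + 1) := by
        rw [List.drop_drop]
      rw [h1, h2, h3, hdropA,
        pvFind_pvG As[i.toNat] ((Bfull.take As.length).drop id.toNat) (As.drop (i.toNat + 1)) t hf]
      push_cast
      ring

theorem alt_eq_pvG (A B : List Int) :
    solution_alt A B
      = (pvG (PySem.List.sorted A (fun x => x) false)
             ((PySem.List.sorted B (fun x => x) false).take A.length) : Int) := by
  simp only [solution_alt]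
  rw [altFold]
  simp

-- ===== VERDICT (by name: the statement is the Claim_ definition above) =====
theorem solution_spec : Claim_equal_solution := by
  intro A B hdom hPre
  unfold Spec_solution
  rw [alt_eq_pvG]
  have hlA : (PySem.List.sorted A (fun x => x) false).length = A.length :=
    PySem.List.length_sorted A (fun x => x) false
  have hlB : (PySem.List.sorted B (fun x => x) false).length = B.length :=
    PySem.List.length_sorted B (fun x => x) false
  have hApw : (PySem.List.sorted A (fun x => x) false).Pairwise (· ≤ ·) := by
    simpa using PySem.List.sorted_pairwise A (fun x => x)
  simp only [solution]
  generalize hAs : PySem.List.sorted A (fun x => x) false = As at *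
  generalize hBs : PySem.List.sorted B (fun x => x) false = Bs at *
  have hAlen : A.length = As.length := hlA.symm
  rw [hAlen]
  have hnb : As.length ≤ Bs.length := by
    unfold Pre_solution at hPre
    omega
  rw [foldLemma As Bs hApw hnb As.length 0 0 0 (by omega) (by omega) (by omega) (by omega)]
  simp
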